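-- pv_equiv track=rewrite | github.com/PascalVA/adventofcode | 2020/10/10.py | find_compatible_adapters
-- ===== SOURCE A (Python) =====
-- def find_compatible_adapters(adapters):
--     compatability_map = {}
--     for i, a1 in enumerate(adapters):
--         cm = compatability_map.setdefault(a1, [])
--         for a2 in adapters[i+1:]:
--             if 3 >= (a2 - a1) >= 1:
--                 cm.append(a2)
--     return compatability_map
-- ===== SOURCE B (Python) =====
-- def find_compatible_adapters(adapters):
--     # Index positions by value, then for each distinct value look up only the
--     # positions holding v+1..v+3 instead of scanning the whole suffix.
--     occ = {}
--     for j, a in enumerate(adapters):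
--         occ.setdefault(a, []).append(j)
--     result = {}
--     for v, idxs in occ.items():
--         cand = sorted(occ.get(v + 1, []) + occ.get(v + 2, []) + occ.get(v + 3, []))
--         result[v] = [adapters[j] for i in idxs for j in cand if j > i]
--     return result
-- ===== Notes on version B (the rewrite author's own statement) =====
-- stated objective: faster
-- what changed: B builds a positions-by-value index once and, for each distinct value v, gathers only the (sorted) positions holding v+1..v+3 after each occurrence of v, instead of A's rescan of the whole remaining suffix for every element.
import Mathlib
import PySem

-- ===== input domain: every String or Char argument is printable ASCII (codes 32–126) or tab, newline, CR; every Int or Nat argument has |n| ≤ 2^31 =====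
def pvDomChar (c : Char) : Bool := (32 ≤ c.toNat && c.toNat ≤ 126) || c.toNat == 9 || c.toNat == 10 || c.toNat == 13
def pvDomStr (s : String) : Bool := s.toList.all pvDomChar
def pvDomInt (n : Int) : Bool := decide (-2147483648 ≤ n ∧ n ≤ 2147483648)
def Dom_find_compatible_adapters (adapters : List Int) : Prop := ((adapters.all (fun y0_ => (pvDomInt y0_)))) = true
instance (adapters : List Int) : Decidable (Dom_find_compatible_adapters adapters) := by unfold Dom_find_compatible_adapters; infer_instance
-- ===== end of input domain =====

-- B replaces A's scan of the whole remaining suffix for every element by a positions-by-value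
-- index: for each distinct value v only the positions holding v+1, v+2 or v+3 are collected
-- (sorted) and filtered to those after each occurrence of v.

-- ===== PORT A =====
def find_compatible_adapters (adapters : List Int) : List (Int × List Int) :=
  PySem.Dict.items <|
    (PySem.List.enumerate adapters 0).foldl
      (fun compatability_map p =>
        let d1 := PySem.Dict.setdefault compatability_map p.2 ([] : List Int)
        let cm := d1.getD p.2 []
        let cm' := (PySem.List.slice adapters (some (p.1 + 1)) none).foldl
          (fun cm a2 => if 3 ≥ a2 - p.2 ∧ a2 - p.2 ≥ 1 then cm ++ [a2] else cm) cm
        d1.insert p.2 cm')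
      PySem.Dict.empty

-- ===== PORT B =====
def find_compatible_adapters_alt (adapters : List Int) : List (Int × List Int) :=
  let occ : PySem.Dict Int (List Int) :=
    (PySem.List.enumerate adapters 0).foldl
      (fun occ p =>
        let d1 := PySem.Dict.setdefault occ p.2 ([] : List Int)
        d1.insert p.2 (d1.getD p.2 [] ++ [p.1]))
      PySem.Dict.empty
  PySem.Dict.items <|
    occ.items.foldl
      (fun result q =>
        let cand := PySem.List.sorted
          (occ.getD (q.1 + 1) [] ++ occ.getD (q.1 + 2) [] ++ occ.getD (q.1 + 3) []) (fun x => x)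
        result.insert q.1
          (q.2.flatMap (fun i =>
            (cand.filter (fun j => decide (j > i))).map (fun j => PySem.List.pyGetD adapters j 0))))
      PySem.Dict.empty

-- ===== PRECONDITION & SPEC =====
def Spec_find_compatible_adapters (adapters : List Int) (out : List (Int × List Int)) : Prop := out = find_compatible_adapters_alt adapters
instance (adapters : List Int) (out : List (Int × List Int)) : Decidable (Spec_find_compatible_adapters adapters out) := by unfold Spec_find_compatible_adapters; infer_instance

-- ===== CLAIM (what is proved, stated in full; the proofs are below) =====
def Claim_equal_find_compatible_adapters : Prop := ∀ (adapters : List Int), Dom_find_compatible_adapters adapters → Spec_find_compatible_adapters adapters (find_compatible_adapters adapters)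

-- ===== LEMMAS AND PROOFS =====

-- One update step of either dict loop (setdefault, then overwrite the key with the extended
-- list) is a `modify` that appends the new tail.
theorem fca_step_eq_modify (d : PySem.Dict Int (List Int)) (k : Int) (g : List Int) :
    (PySem.Dict.setdefault d k []).insert k
      ((PySem.Dict.setdefault d k []).getD k [] ++ g) = d.modify k [] (· ++ g) := by
  by_cases h : d.contains k = true
  · rw [PySem.Dict.setdefault_of_contains d [] h]; rfl
  · rw [PySem.Dict.setdefault_of_not_contains d [] (by simpa using h)]
    rw [PySem.Dict.getD_insert_self, PySem.Dict.insert_insert_self]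
    show _ = d.insert k (d.getD k [] ++ g)
    rw [PySem.Dict.getD_of_not_contains d [] (by simpa using h)]

-- the canonical "group into a dict by second component" fold, and the per-key row it builds
def fcaMkd (l : List (Int × Int)) (g : Int → Int → List Int) : PySem.Dict Int (List Int) :=
  l.foldl (fun d p => d.modify p.2 [] (· ++ g p.1 p.2)) PySem.Dict.empty

def fcaRow (l : List (Int × Int)) (g : Int → Int → List Int) (v : Int) : List Int :=
  (l.filter (fun p => p.2 == v)).flatMap (fun p => g p.1 p.2)

theorem fca_getD_foldl_modify (g : Int → Int → List Int) :
    ∀ (l : List (Int × Int)) (d : PySem.Dict Int (List Int)) (c : Int),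
      (l.foldl (fun d p => d.modify p.2 [] (· ++ g p.1 p.2)) d).getD c []
        = d.getD c [] ++ fcaRow l g c := by
  intro l
  induction l with
  | nil => intro d c; simp [fcaRow]
  | cons p l ih =>
    intro d c
    rw [List.foldl_cons, ih]
    rw [PySem.Dict.getD_modify]
    unfold fcaRow
    by_cases h : p.2 = c
    · simp [h]
    · simp [h, Ne.symm h]

theorem fca_keys_mkd (l : List (Int × Int)) (g : Int → Int → List Int) :
    (fcaMkd l g).keys = PySem.Set.ofList (l.map (·.2)) := by
  unfold fcaMkd
  rw [PySem.Dict.keys_foldl_modify_key l (·.2) [] (fun _ p => (· ++ g p.1 p.2)) PySem.Dict.empty]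
  rfl

theorem fca_nodup_keys_mkd (l : List (Int × Int)) (g : Int → Int → List Int) :
    (fcaMkd l g).keys.Nodup :=
  PySem.Dict.nodup_keys_foldl_modify_key l (·.2) [] (fun _ p => (· ++ g p.1 p.2)) PySem.Dict.empty
    (by simp [PySem.Dict.keys_empty])

theorem fca_items_mkd (l : List (Int × Int)) (g : Int → Int → List Int) :
    (fcaMkd l g).items
      = (PySem.Set.ofList (l.map (·.2))).map (fun v => (v, fcaRow l g v)) := by
  rw [PySem.Dict.items_eq_map_keys (fcaMkd l g) (fca_nodup_keys_mkd l g) []]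
  rw [fca_keys_mkd]
  exact List.map_congr_left (fun v _ => by
    rw [show (fcaMkd l g).getD v [] = fcaRow l g v from by
      unfold fcaMkd; rw [fca_getD_foldl_modify]; simp [PySem.Dict.getD_empty]])

-- A's per-occurrence contribution: the filtered suffix after index i
def fcaGA (adapters : List Int) (i v : Int) : List Int :=
  (PySem.List.slice adapters (some (i + 1)) none).filter
    (fun a2 => decide (3 ≥ a2 - v ∧ a2 - v ≥ 1))

theorem fca_A_eq (adapters : List Int) :
    find_compatible_adapters adapters
      = (PySem.Set.ofList adapters).map
          (fun v => (v, fcaRow (PySem.List.enumerate adapters 0) (fcaGA adapters) v)) := by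
  unfold find_compatible_adapters
  have hstep : (fun (compatability_map : PySem.Dict Int (List Int)) (p : Int × Int) =>
        let d1 := PySem.Dict.setdefault compatability_map p.2 ([] : List Int)
        let cm := d1.getD p.2 []
        let cm' := (PySem.List.slice adapters (some (p.1 + 1)) none).foldl
          (fun cm a2 => if 3 ≥ a2 - p.2 ∧ a2 - p.2 ≥ 1 then cm ++ [a2] else cm) cm
        d1.insert p.2 cm')
      = (fun (d : PySem.Dict Int (List Int)) p => d.modify p.2 [] (· ++ fcaGA adapters p.1 p.2)) := by
    funext d p
    show (PySem.Dict.setdefault d p.2 []).insert p.2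
      ((PySem.List.slice adapters (some (p.1 + 1)) none).foldl
          (fun cm a2 => if 3 ≥ a2 - p.2 ∧ a2 - p.2 ≥ 1 then cm ++ [a2] else cm)
          ((PySem.Dict.setdefault d p.2 []).getD p.2 [])) = _
    have hif : (fun (cm : List Int) a2 => if 3 ≥ a2 - p.2 ∧ a2 - p.2 ≥ 1 then cm ++ [a2] else cm)
         = (fun cm a2 => if (fun b => decide (3 ≥ b - p.2 ∧ b - p.2 ≥ 1)) a2 = true then cm ++ [id a2] else cm) := by
      funext cm a2; simp
    rw [hif, PySem.List.foldl_append_if, List.map_id]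
    exact fca_step_eq_modify d p.2 (fcaGA adapters p.1 p.2)
  rw [hstep]
  rw [show ((PySem.List.enumerate adapters 0).foldl
        (fun d p => d.modify p.2 [] (· ++ fcaGA adapters p.1 p.2)) PySem.Dict.empty)
      = fcaMkd (PySem.List.enumerate adapters 0) (fcaGA adapters) from rfl]
  rw [fca_items_mkd, PySem.List.map_snd_enumerate]

-- B's occurrence index and per-key body, named for the proofs
def fcaOcc (adapters : List Int) : PySem.Dict Int (List Int) :=
  fcaMkd (PySem.List.enumerate adapters 0) (fun i _ => [i])

def fcaBody (adapters : List Int) (occ : PySem.Dict Int (List Int)) (q : Int × List Int) : List Int :=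
  let cand := PySem.List.sorted
    (occ.getD (q.1 + 1) [] ++ occ.getD (q.1 + 2) [] ++ occ.getD (q.1 + 3) []) (fun x => x)
  q.2.flatMap (fun i =>
    (cand.filter (fun j => decide (j > i))).map (fun j => PySem.List.pyGetD adapters j 0))

theorem fca_row_singleton (l : List (Int × Int)) (v : Int) :
    fcaRow l (fun i _ => [i]) v = (l.filter (fun p => p.2 == v)).map (·.1) := by
  unfold fcaRow
  exact Eq.symm List.map_eq_flatMap

theorem fca_B_eq (adapters : List Int) :
    find_compatible_adapters_alt adapters
      = (PySem.Set.ofList adapters).map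
          (fun v => (v, fcaBody adapters (fcaOcc adapters)
            (v, ((PySem.List.enumerate adapters 0).filter (fun p => p.2 == v)).map (·.1)))) := by
  unfold find_compatible_adapters_alt
  have hstep : (fun (occ : PySem.Dict Int (List Int)) (p : Int × Int) =>
      let d1 := PySem.Dict.setdefault occ p.2 ([] : List Int)
      d1.insert p.2 (d1.getD p.2 [] ++ [p.1]))
      = (fun (d : PySem.Dict Int (List Int)) p => d.modify p.2 [] (· ++ [p.1])) := by
    funext d p
    exact fca_step_eq_modify d p.2 [p.1]
  rw [hstep]
  rw [show ((PySem.List.enumerate adapters 0).foldl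
        (fun (d : PySem.Dict Int (List Int)) (p : Int × Int) => d.modify p.2 [] (· ++ [p.1]))
        PySem.Dict.empty) = fcaOcc adapters from rfl]
  dsimp only []
  have hfun : (fun (result : PySem.Dict Int (List Int)) (q : Int × List Int) =>
      let cand := PySem.List.sorted
        ((fcaOcc adapters).getD (q.1 + 1) [] ++ (fcaOcc adapters).getD (q.1 + 2) []
          ++ (fcaOcc adapters).getD (q.1 + 3) []) (fun x => x)
      result.insert q.1
        (q.2.flatMap (fun i =>
          (cand.filter (fun j => decide (j > i))).map (fun j => PySem.List.pyGetD adapters j 0))))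
      = (fun result q => result.insert q.1 (fcaBody adapters (fcaOcc adapters) q)) := rfl
  rw [hfun]
  rw [PySem.Dict.items_foldl_insert_fresh (fcaOcc adapters).items (·.1)
        (fcaBody adapters (fcaOcc adapters)) PySem.Dict.empty
        (by intro a _; exact PySem.Dict.contains_empty a.1)
        (fca_nodup_keys_mkd (PySem.List.enumerate adapters 0) (fun i _ => [i]))]
  rw [show (fcaOcc adapters).items = (PySem.Set.ofList adapters).map
        (fun v => (v, ((PySem.List.enumerate adapters 0).filter (fun p => p.2 == v)).map (·.1))) from by
    unfold fcaOcc
    rw [fca_items_mkd, PySem.List.map_snd_enumerate]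
    exact List.map_congr_left (fun v _ => by rw [fca_row_singleton])]
  rw [List.map_map]
  rfl

-- the membership condition 1 ≤ a2 - v ≤ 3 names exactly the three values v+1, v+2, v+3
theorem fca_predb (v b : Int) :
    (decide (3 ≥ b - v ∧ b - v ≥ 1)) = (b == v + 1 || b == v + 2 || b == v + 3) := by
  rw [Bool.eq_iff_iff]; simp only [decide_eq_true_eq, Bool.or_eq_true, beq_iff_eq]; omega

theorem fca_filter_or_perm {α : Type} (p q : α → Bool) (h : ∀ x, ¬(p x = true ∧ q x = true)) :
    ∀ l : List α, (l.filter (fun x => p x || q x)).Perm (l.filter p ++ l.filter q) := by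
  intro l
  induction l with
  | nil => simp
  | cons a l ih =>
    by_cases hp : p a = true
    · have hq : q a = false := by
        rcases Bool.eq_false_or_eq_true (q a) with h' | h'
        · exact absurd ⟨hp, h'⟩ (h a)
        · exact h'
      simp only [List.filter_cons, hp, hq, Bool.true_or, if_true]
      simpa using ih.cons a
    · have hp' : p a = false := by simpa using hp
      by_cases hq : q a = true
      · simp only [List.filter_cons, hp', hq, Bool.false_or, if_true]
        exact (ih.cons a).trans (List.perm_middle.symm)
      · have hq' : q a = false := by simpa using hq
        simpa [List.filter_cons, hp', hq'] using ih

theorem fca_fst_ge_of_mem_enumerate {α : Type} (xs : List α) (s : Int) (p : Int × α)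
    (h : p ∈ PySem.List.enumerate xs s) : s ≤ p.1 := by
  rw [PySem.List.mem_enumerate_iff] at h
  obtain ⟨k, hk, rfl⟩ := h
  simp

-- filtering the enumeration to indices ≥ s + m and projecting the values is a drop
theorem fca_enum_drop (xs : List Int) (q : Int → Bool) :
    ∀ (m : Nat) (s : Int),
      (((PySem.List.enumerate xs s).filter (fun p => q p.2 && decide (s + (m : Int) ≤ p.1))).map (·.2))
        = (xs.drop m).filter q := by
  induction xs with
  | nil => intro m s; simp [PySem.List.enumerate_nil]
  | cons x xs ih =>
    intro m s
    rw [PySem.List.enumerate_cons]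
    cases m with
    | zero =>
      have htail : ((PySem.List.enumerate xs (s + 1)).filter
            (fun p => q p.2 && decide (s + ((0 : Nat) : Int) ≤ p.1)))
          = ((PySem.List.enumerate xs (s + 1)).filter
            (fun p => q p.2 && decide ((s + 1) + ((0 : Nat) : Int) ≤ p.1))) := by
        apply List.filter_congr
        intro p hp
        have := fca_fst_ge_of_mem_enumerate xs (s + 1) p hp
        congr 1
        rw [Bool.eq_iff_iff]; simp only [decide_eq_true_eq]; omega
      have hhead : (q (s, x).2 && decide (s + ((0 : Nat) : Int) ≤ (s, x).1)) = q x := by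
        simp
      simp only [List.filter_cons, hhead, htail]
      by_cases hqx : q x = true
      · rw [if_pos hqx, List.map_cons, ih 0 (s + 1)]
        simp [hqx]
      · have hqx' : q x = false := by simpa using hqx
        rw [if_neg (by simp [hqx']), ih 0 (s + 1)]
        simp [hqx']
    | succ m =>
      have hhead : (q (s, x).2 && decide (s + ((m + 1 : Nat) : Int) ≤ (s, x).1)) = false := by
        simp only [Bool.and_eq_false_iff, decide_eq_false_iff_not]
        right; push_cast; omega
      have htail : ((PySem.List.enumerate xs (s + 1)).filter
            (fun p => q p.2 && decide (s + ((m + 1 : Nat) : Int) ≤ p.1)))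
          = ((PySem.List.enumerate xs (s + 1)).filter
            (fun p => q p.2 && decide ((s + 1) + ((m : Nat) : Int) ≤ p.1))) := by
        apply List.filter_congr
        intro p hp
        congr 1
        rw [Bool.eq_iff_iff]; simp only [decide_eq_true_eq]; push_cast; omega
      simp only [List.filter_cons, hhead, htail, Bool.false_eq_true, if_false]
      rw [ih m (s + 1)]
      rfl

-- B's candidate list for a key v, characterised as a filter of the enumeration
def fcaC (adapters : List Int) (v : Int) : List (Int × Int) :=
  (PySem.List.enumerate adapters 0).filter
    (fun p => p.2 == v + 1 || p.2 == v + 2 || p.2 == v + 3)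

theorem fca_occ_getD (adapters : List Int) (c : Int) :
    (fcaOcc adapters).getD c []
      = ((PySem.List.enumerate adapters 0).filter (fun p => p.2 == c)).map (·.1) := by
  unfold fcaOcc fcaMkd
  rw [fca_getD_foldl_modify (fun i _ => [i]) (PySem.List.enumerate adapters 0) PySem.Dict.empty c]
  simp [PySem.Dict.getD_empty, fca_row_singleton]

theorem fca_cand_eq (adapters : List Int) (v : Int) :
    PySem.List.sorted ((fcaOcc adapters).getD (v + 1) [] ++ (fcaOcc adapters).getD (v + 2) []
        ++ (fcaOcc adapters).getD (v + 3) []) (fun x => x)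
      = (fcaC adapters v).map (·.1) := by
  apply PySem.List.sorted_eq_of_perm_of_pairwise_lt
  · rw [fca_occ_getD, fca_occ_getD, fca_occ_getD]
    rw [← List.map_append, ← List.map_append]
    unfold fcaC
    apply List.Perm.map
    have h3 := fca_filter_or_perm
      (fun p : Int × Int => p.2 == v + 1 || p.2 == v + 2) (fun p => p.2 == v + 3)
      (by intro x; simp only [Bool.or_eq_true, beq_iff_eq, not_and]; intro h1 h2; omega)
      (PySem.List.enumerate adapters 0)
    have h2 := fca_filter_or_perm
      (fun p : Int × Int => p.2 == v + 1) (fun p => p.2 == v + 2)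
      (by intro x; simp only [beq_iff_eq, not_and]; intro h1 h2; omega)
      (PySem.List.enumerate adapters 0)
    exact h3.trans (h2.append_right _)
  · rw [List.pairwise_map]
    exact (PySem.List.pairwise_lt_enumerate adapters 0).filter _

-- per index: A's filtered suffix after k equals B's candidate positions after k, dereferenced
theorem fca_index (adapters : List Int) (v : Int) (k : Nat) :
    fcaGA adapters (k : Int) v
      = (((fcaC adapters v).map (·.1)).filter (fun j => decide (j > (k : Int)))).map
          (fun j => PySem.List.pyGetD adapters j 0) := by
  unfold fcaGA
  rw [show ((k : Int) + 1) = ((k + 1 : Nat) : Int) from by push_cast; ring,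
    PySem.List.slice_from_natCast]
  rw [show (fun a2 : Int => decide (3 ≥ a2 - v ∧ a2 - v ≥ 1))
      = (fun b : Int => b == v + 1 || b == v + 2 || b == v + 3) from funext (fca_predb v)]
  rw [← fca_enum_drop adapters (fun b => b == v + 1 || b == v + 2 || b == v + 3) (k + 1) 0]
  rw [List.filter_map, List.map_map]
  unfold fcaC
  rw [List.filter_filter]
  rw [show (fun a : Int × Int => ((fun j => decide (j > (k : Int))) ∘ (·.1)) a
        && (a.2 == v + 1 || a.2 == v + 2 || a.2 == v + 3))
      = (fun p : Int × Int => (p.2 == v + 1 || p.2 == v + 2 || p.2 == v + 3)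
        && decide ((0 : Int) + ((k + 1 : Nat) : Int) ≤ p.1)) from by
    funext p
    rw [Bool.and_comm]
    congr 1
    rw [Bool.eq_iff_iff]; simp only [Function.comp_apply, decide_eq_true_eq]; push_cast; omega]
  apply List.map_congr_left
  intro p hp
  have hpe := List.mem_of_mem_filter hp
  rw [PySem.List.mem_enumerate_iff] at hpe
  obtain ⟨k', hk', rfl⟩ := hpe
  show (((0 : Int) + (k' : Int)), adapters[k']).2 = PySem.List.pyGetD adapters ((0 : Int) + (k' : Int)) 0
  rw [zero_add, PySem.List.pyGetD_natCast]
  simp [hk']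

theorem fca_row_eq (adapters : List Int) (v : Int) :
    fcaRow (PySem.List.enumerate adapters 0) (fcaGA adapters) v
      = fcaBody adapters (fcaOcc adapters)
          (v, ((PySem.List.enumerate adapters 0).filter (fun p => p.2 == v)).map (·.1)) := by
  unfold fcaBody
  dsimp only []
  rw [fca_cand_eq]
  rw [List.flatMap_map]
  unfold fcaRow
  apply List.flatMap_congr
  intro p hp
  have hpv : p.2 = v := by simpa using (List.mem_filter.mp hp).2
  have hpe := List.mem_of_mem_filter hp
  rw [PySem.List.mem_enumerate_iff] at hpe
  obtain ⟨k, hk, hpeq⟩ := hpe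
  have h1 : p.1 = (k : Int) := by rw [hpeq]; simp
  rw [hpv, h1, fca_index]

-- ===== VERDICT (by name: the statement is the Claim_ definition above) =====
theorem find_compatible_adapters_spec : Claim_equal_find_compatible_adapters := by
  intro adapters _
  show find_compatible_adapters adapters = find_compatible_adapters_alt adapters
  rw [fca_A_eq, fca_B_eq]
  exact List.map_congr_left (fun v _ => by rw [fca_row_eq])
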